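-- pv_equiv track=rewrite | github.com/byplusone/Comment-Spider-for-SinaWeibo | clearAT-V.py | clearAT
-- ===== SOURCE A (Python) =====
-- def clearAT(content):
-- 	clearedContent = []
-- 	flag = 0
-- 	if not isinstance(content, str):
-- 		return content
-- 	for i in content:
-- 		if i == '@':
-- 			flag = 1
-- 			continue
-- 		elif i != ':' and flag == 1:
-- 			continue
-- 		elif i == ':' and flag == 1:
-- 			flag = 0
-- 			continue
-- 		clearedContent.append(i)
--
-- 	return ''.join(clearedContent)
-- ===== SOURCE B (Python) =====
-- def clearAT(content):
-- 	if not isinstance(content, str):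
-- 		return content
-- 	out = []
-- 	rest = content
-- 	while True:
-- 		head, sep, rest = rest.partition('@')
-- 		out.append(head)
-- 		if not sep:
-- 			return ''.join(out)
-- 		rest = rest.partition(':')[2]
-- ===== Notes on version B (the rewrite author's own statement) =====
-- stated objective: faster
-- what changed: Replaces the per-character flag state machine with a loop of str.partition calls: cut at the next '@', keep the piece before it, drop the following segment up to and including its first ':', and join the kept pieces.
import Mathlib
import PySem

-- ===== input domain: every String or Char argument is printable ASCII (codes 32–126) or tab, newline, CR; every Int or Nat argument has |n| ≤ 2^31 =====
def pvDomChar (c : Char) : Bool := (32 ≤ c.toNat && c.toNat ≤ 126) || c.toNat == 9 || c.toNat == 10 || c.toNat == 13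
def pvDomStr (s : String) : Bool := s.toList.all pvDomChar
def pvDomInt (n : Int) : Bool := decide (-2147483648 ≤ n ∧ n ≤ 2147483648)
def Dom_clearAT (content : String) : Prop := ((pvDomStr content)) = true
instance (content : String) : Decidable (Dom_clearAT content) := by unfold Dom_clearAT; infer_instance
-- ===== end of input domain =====

-- B replaces A's per-character flag state machine with a loop of partition steps
-- (cut at next '@', drop through the following ':', join the kept pieces): simpler decomposition.


-- ===== PORT A =====
-- (isinstance(content, str) is always true at type String, so the early return never fires)
-- state: (clearedContent, flag); flag is a Python int
def clearATstep (st : List Char × Int) (i : Char) : List Char × Int :=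
  if i = '@' then (st.1, 1)
  else if i ≠ ':' ∧ st.2 = 1 then st
  else if i = ':' ∧ st.2 = 1 then (st.1, 0)
  else (st.1 ++ [i], st.2)

def clearAT (content : String) : String :=
  String.mk (content.toList.foldl clearATstep ([], 0)).1

-- ===== PORT B =====
-- rest.partition('@') = (takeWhile (· ≠ '@'), sep?, suffix after the '@'); ported by hand, exact:
-- the match on dropWhile is empty iff sep == ''.  rest.partition(':')[2] is (dropWhile (· ≠ ':')).tail
-- ('' when there is no ':').  ''.join(out) is .flatten.
def clearAT_altGo (rest : List Char) (out : List (List Char)) : List Char :=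
  let head := rest.takeWhile (· ≠ '@')
  match h : rest.dropWhile (· ≠ '@') with
  | [] => (out ++ [head]).flatten
  | _ :: r2 => clearAT_altGo ((r2.dropWhile (· ≠ ':')).tail) (out ++ [head])
termination_by rest.length
decreasing_by
  have h1 : ((r2.dropWhile (· ≠ ':')).tail).length ≤ r2.length := by
    have := List.length_dropWhile_le (fun x => decide (x ≠ ':')) r2
    have : ((List.dropWhile (fun x => decide (x ≠ ':')) r2).tail).length = (List.dropWhile (fun x => decide (x ≠ ':')) r2).length - 1 := List.length_tail
    omega
  have h2 : r2.length < rest.length := by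
    have h3 := List.length_dropWhile_le (fun x => decide (x ≠ '@')) rest
    rw [h] at h3
    simp at h3
    omega
  omega

def clearAT_alt (content : String) : String :=
  String.mk (clearAT_altGo content.toList [])

-- ===== PRECONDITION & SPEC =====
def Spec_clearAT (content : String) (out : String) : Prop := out = clearAT_alt content
instance (content : String) (out : String) : Decidable (Spec_clearAT content out) := by unfold Spec_clearAT; infer_instance

-- ===== CLAIM (what is proved, stated in full; the proofs are below) =====
def Claim_equal_clearAT : Prop := ∀ (content : String), Dom_clearAT content → Spec_clearAT content (clearAT content)

-- ===== LEMMAS AND PROOFS =====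

lemma dropWhile_cons_false {p : Char → Bool} {l r2 : List Char} {c : Char}
    (h : l.dropWhile p = c :: r2) : p c = false := by
  have hne : l.dropWhile p ≠ [] := by simp [h]
  have h2 := List.head_dropWhile_not p hne
  simp [h] at h2
  exact h2

-- altGo unfolding equations
lemma altGo_nil (rest : List Char) (out : List (List Char))
    (h : rest.dropWhile (· ≠ '@') = []) :
    clearAT_altGo rest out = (out ++ [rest.takeWhile (· ≠ '@')]).flatten := by
  rw [clearAT_altGo]
  split
  · rfl
  · next c r2 heq => rw [h] at heq; cases heq

lemma altGo_cons (rest : List Char) (out : List (List Char)) (c : Char) (r2 : List Char)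
    (h : rest.dropWhile (· ≠ '@') = c :: r2) :
    clearAT_altGo rest out
      = clearAT_altGo ((r2.dropWhile (· ≠ ':')).tail) (out ++ [rest.takeWhile (· ≠ '@')]) := by
  rw [clearAT_altGo]
  split
  · next heq => rw [h] at heq; cases heq
  · next c' r2' heq =>
      rw [h] at heq
      injection heq with h1 h2
      subst h2
      rfl

-- the flag-0 machine copies any '@'-free prefix to the accumulator unchanged
lemma machine_copy (pre : List Char) (hpre : ∀ c ∈ pre, c ≠ '@') (cs acc : List Char) :
    List.foldl clearATstep (acc, 0) (pre ++ cs) = List.foldl clearATstep (acc ++ pre, 0) cs := by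
  induction pre generalizing acc with
  | nil => simp
  | cons c pre ih =>
    have hc : c ≠ '@' := hpre c (by simp)
    have hstep : clearATstep (acc, 0) c = (acc ++ [c], 0) := by
      simp [clearATstep, hc]
    simp only [List.cons_append, List.foldl_cons, hstep]
    rw [ih (fun d hd => hpre d (by simp [hd]))]
    simp

-- the flag-1 machine skips everything up to and including the first ':'
lemma machine_skip (r : List Char) (acc : List Char) :
    (List.foldl clearATstep (acc, 1) r).1
      = (List.foldl clearATstep (acc, 0) ((r.dropWhile (· ≠ ':')).tail)).1 := by
  induction r with
  | nil => simp
  | cons c r ih =>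
    by_cases hc : c = ':'
    · subst hc
      have hstep : clearATstep (acc, 1) ':' = (acc, 0) := by simp [clearATstep]
      simp [hstep]
    · have hstep : clearATstep (acc, 1) c = (acc, 1) := by
        by_cases h2 : c = '@' <;> simp [clearATstep, h2, hc]
      simp only [List.foldl_cons, hstep]
      rw [ih]
      have : (c :: r).dropWhile (· ≠ ':') = r.dropWhile (· ≠ ':') := by
        simp [hc]
      rw [this]

-- main invariant: the machine from flag 0 computes altGo
lemma machine_eq_altGo (n : Nat) : ∀ cs : List Char, cs.length ≤ n →
    ∀ out : List (List Char),
      (List.foldl clearATstep (out.flatten, 0) cs).1 = clearAT_altGo cs out := by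
  induction n with
  | zero =>
    intro cs hcs out
    have : cs = [] := by simpa using List.length_eq_zero_iff.mp (Nat.le_zero.mp hcs)
    subst this
    simp [altGo_nil]
  | succ n ih =>
    intro cs hcs out
    have hsplit := List.takeWhile_append_dropWhile (p := (· ≠ '@')) (l := cs)
    have hpre : ∀ c ∈ cs.takeWhile (· ≠ '@'), c ≠ '@' := by
      intro c hc
      simpa using List.mem_takeWhile_imp hc
    cases hd : cs.dropWhile (· ≠ '@') with
    | nil =>
      rw [altGo_nil cs out hd]
      conv_lhs => rw [← hsplit]
      rw [hd, machine_copy _ hpre]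
      simp
    | cons c r2 =>
      have hc : c = '@' := by
        have := dropWhile_cons_false hd
        simpa using this
      subst hc
      have hlen : cs.length = (cs.takeWhile (· ≠ '@')).length + ('@' :: r2).length := by
        conv_lhs => rw [← hsplit, hd]
        simp
      rw [altGo_cons cs out '@' r2 hd]
      conv_lhs => rw [← hsplit]
      rw [hd, machine_copy _ hpre]
      have hstep : clearATstep (out.flatten ++ cs.takeWhile (· ≠ '@'), 0) '@'
          = (out.flatten ++ cs.takeWhile (· ≠ '@'), 1) := by simp [clearATstep]
      simp only [List.foldl_cons, hstep]
      rw [machine_skip]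
      have hfl : out.flatten ++ cs.takeWhile (· ≠ '@')
          = (out ++ [cs.takeWhile (· ≠ '@')]).flatten := by simp
      rw [hfl]
      apply ih
      have h1 : ((r2.dropWhile (· ≠ ':')).tail).length ≤ r2.length := by
        have := List.length_dropWhile_le (fun x => decide (x ≠ ':')) r2
        have h2 : ((r2.dropWhile (fun x => decide (x ≠ ':'))).tail).length
            = (r2.dropWhile (fun x => decide (x ≠ ':'))).length - 1 := List.length_tail
        simp only [h2]
        omega
      simp only [List.length_cons] at hlen
      omega

-- ===== VERDICT (by name: the statement is the Claim_ definition above) =====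
theorem clearAT_spec : Claim_equal_clearAT := by
  intro content _
  unfold Spec_clearAT clearAT clearAT_alt
  have := machine_eq_altGo content.toList.length content.toList le_rfl []
  simp only [List.flatten_nil] at this
  exact congrArg String.mk this
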